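-- pv_equiv track=rewrite | github.com/jchung05/google_code_jam | 2015/qualifications/standing_ovation/standing_ovation.py | ovation
-- ===== SOURCE A (Python) =====
-- def ovation(s_max, num):
--     total = 0
--     needed = 0
--
--     for idx,val in enumerate(num):
--         if idx > total:
--             needed += idx - total
--             total = idx
--         total += int(val)
--     return (needed)
-- ===== SOURCE B (Python) =====
-- def ovation(s_max, num):
--     # prefix[i] = number of attendees with shyness < i (sum of the first i digits)
--     prefix = [0]
--     run = 0
--     for ch in num:
--         run += int(ch)
--         prefix.append(run)
--     # answer = max shortfall i - prefix[i] over positions, clamped at 0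
--     worst = 0
--     for i in range(len(num)):
--         if i - prefix[i] > worst:
--             worst = i - prefix[i]
--     return worst
-- ===== Notes on version B (the rewrite author's own statement) =====
-- stated objective: alternative
-- what changed: Replaces A's single greedy loop that patches one (total, needed) accumulator in place by a two-pass decomposition: first build the prefix-count table prefix[i] = attendees with shyness < i, then a separate pass taking the maximum shortfall max(0, max_i (i - prefix[i])).
import Mathlib
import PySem

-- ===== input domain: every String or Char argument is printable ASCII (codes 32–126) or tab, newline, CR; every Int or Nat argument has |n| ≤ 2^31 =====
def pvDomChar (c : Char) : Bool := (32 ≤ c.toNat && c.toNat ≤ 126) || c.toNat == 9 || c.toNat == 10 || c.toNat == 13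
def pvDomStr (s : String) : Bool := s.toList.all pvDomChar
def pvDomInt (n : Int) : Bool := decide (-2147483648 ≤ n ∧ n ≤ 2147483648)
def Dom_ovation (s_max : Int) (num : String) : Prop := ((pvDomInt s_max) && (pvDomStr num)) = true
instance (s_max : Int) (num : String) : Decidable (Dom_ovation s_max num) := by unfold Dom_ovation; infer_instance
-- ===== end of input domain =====

-- B replaces A's single accumulator-patching greedy loop by a prefix-count table plus a
-- separate max-shortfall pass (objective: alternative decomposition; same O(n) cost).

-- int(val) for a single character val (both Pythons apply it to the same characters;
-- Pre_ guarantees it succeeds, so the default 0 is never taken)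
def pvDigit (c : Char) : Int := (PySem.Int.ofStr? (String.ofList [c])).getD 0

-- ===== PORT A =====
def ovation (s_max : Int) (num : String) : Int :=
  ((PySem.List.enumerate num.toList 0).foldl
    (fun (st : Int × Int) (p : Int × Char) =>
      let st2 := if p.1 > st.1 then (p.1, st.2 + (p.1 - st.1)) else st
      (st2.1 + pvDigit p.2, st2.2)) (0, 0)).2

-- ===== PORT B =====
def ovation_alt (s_max : Int) (num : String) : Int :=
  let pr := num.toList.foldl
    (fun (st : List Int × Int) c =>
      let run := st.2 + pvDigit c
      (st.1 ++ [run], run)) ([0], 0)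
  (PySem.List.pyRange 0 (PySem.Str.len num) 1).foldl
    (fun worst i =>
      if i - PySem.List.pyGetD pr.1 i 0 > worst
      then i - PySem.List.pyGetD pr.1 i 0 else worst) 0

-- ===== PRECONDITION & SPEC =====
-- Pre_ excludes strings with a non-digit character, on which both Pythons raise ValueError at int(val).
def Pre_ovation (s_max : Int) (num : String) : Prop :=
  num.toList.all Char.isDigit = true
instance (s_max : Int) (num : String) : Decidable (Pre_ovation s_max num) := by
  unfold Pre_ovation; infer_instance
def pvWitness_ovation : Int × String := (5, "091")

def Spec_ovation (s_max : Int) (num : String) (out : Int) : Prop := out = ovation_alt s_max num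
instance (s_max : Int) (num : String) (out : Int) : Decidable (Spec_ovation s_max num out) := by unfold Spec_ovation; infer_instance

-- ===== CLAIM (what is proved, stated in full; the proofs are below) =====
def Claim_equal_ovation : Prop := ∀ (s_max : Int) (num : String), Dom_ovation s_max num → Pre_ovation s_max num → Spec_ovation s_max num (ovation s_max num)

-- ===== LEMMAS AND PROOFS =====

-- sum of digit values
def pvPsum (l : List Char) : Int := (l.map pvDigit).sum

-- common middleman: j = current index, s = digits seen so far, n = needed so far
def pvCore : List Char → Int → Int → Int → Int
  | [], _, _, n => n
  | c :: cs, j, s, n => pvCore cs (j + 1) (s + pvDigit c) (if j - s > n then j - s else n)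

-- running prefix sums of the digit values starting from r (excluding r itself)
def pvSums : Int → List Char → List Int
  | _, [] => []
  | r, c :: cs => (r + pvDigit c) :: pvSums (r + pvDigit c) cs

lemma pvA_fold (l : List Char) (j s n : Int) :
    ((PySem.List.enumerate l j).foldl
      (fun (st : Int × Int) (p : Int × Char) =>
        let st2 := if p.1 > st.1 then (p.1, st.2 + (p.1 - st.1)) else st
        (st2.1 + pvDigit p.2, st2.2)) (n + s, n)).2 = pvCore l j s n := by
  induction l generalizing j s n with
  | nil => simp [PySem.List.enumerate_nil, pvCore]
  | cons c cs ih =>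
    rw [PySem.List.enumerate_cons]
    simp only [List.foldl_cons, pvCore]
    by_cases h : j - s > n
    · have h' : j > n + s := by omega
      rw [if_pos h', if_pos h]
      have e1 : j + pvDigit c = (j - s) + (s + pvDigit c) := by ring
      have e2 : n + (j - (n + s)) = j - s := by ring
      simp only [e2]
      calc ((PySem.List.enumerate cs (j+1)).foldl _ (j + pvDigit c, j - s)).2
          = ((PySem.List.enumerate cs (j+1)).foldl _ ((j - s) + (s + pvDigit c), j - s)).2 := by rw [e1]
        _ = pvCore cs (j+1) (s + pvDigit c) (j - s) := ih (j+1) (s + pvDigit c) (j - s)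
    · have h' : ¬ j > n + s := by omega
      rw [if_neg h', if_neg h]
      have e1 : n + s + pvDigit c = n + (s + pvDigit c) := by ring
      calc ((PySem.List.enumerate cs (j+1)).foldl _ (n + s + pvDigit c, n)).2
          = ((PySem.List.enumerate cs (j+1)).foldl _ (n + (s + pvDigit c), n)).2 := by rw [e1]
        _ = pvCore cs (j+1) (s + pvDigit c) n := ih (j+1) (s + pvDigit c) n

lemma pvBuild (l : List Char) (acc : List Int) (r : Int) :
    l.foldl (fun (st : List Int × Int) c =>
      let run := st.2 + pvDigit c
      (st.1 ++ [run], run)) (acc, r) = (acc ++ pvSums r l, r + pvPsum l) := by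
  induction l generalizing acc r with
  | nil => simp [pvSums, pvPsum]
  | cons c cs ih =>
    simp only [List.foldl_cons, ih, pvSums, pvPsum, List.map_cons, List.sum_cons, Prod.mk.injEq]
    constructor
    · simp
    · ring

lemma pvSums_get (l : List Char) (r : Int) (i : Nat) (h : i ≤ l.length) :
    (r :: pvSums r l)[i]? = some (r + pvPsum (l.take i)) := by
  induction l generalizing r i with
  | nil =>
    have hi : i = 0 := by simpa using h
    subst hi
    simp [pvPsum]
  | cons c cs ih =>
    cases i with
    | zero => simp [pvPsum]
    | succ i' =>
      simp only [pvSums, List.getElem?_cons_succ]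
      rw [ih (r + pvDigit c) i' (by simpa using h)]
      simp only [List.take_succ_cons, pvPsum, List.map_cons, List.sum_cons]
      congr 1
      ring

lemma pvB_core (l : List Char) (j s n : Int) :
    pvCore l j s n =
      (List.range l.length).foldl
        (fun w (k : Nat) => if (j + (k : Int)) - (s + pvPsum (l.take k)) > w
                    then (j + (k : Int)) - (s + pvPsum (l.take k)) else w) n := by
  induction l generalizing j s n with
  | nil => simp [pvCore]
  | cons c cs ih =>
    rw [List.length_cons, List.range_succ_eq_map]
    simp only [List.foldl_cons, List.foldl_map, pvCore]
    have h0 : ((0:Nat):Int) = 0 := rfl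
    simp only [h0, List.take_zero, pvPsum, List.map_nil, List.sum_nil, add_zero]
    rw [ih (j+1) (s + pvDigit c)]
    apply PySem.List.foldl_congr_mem
    intro w k _
    have : (((k + 1 : Nat)) : Int) = (k : Int) + 1 := by push_cast; ring
    simp only [List.take_succ_cons, pvPsum, List.map_cons, List.sum_cons, this]
    have e : j + 1 + (k : Int) - (s + pvDigit c + (pvPsum (cs.take k)))
           = j + ((k : Int) + 1) - (s + (pvDigit c + pvPsum (cs.take k))) := by
      simp [pvPsum]; ring
    simp only [pvPsum] at e
    rw [e]

-- ===== VERDICT (by name: the statement is the Claim_ definition above) =====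
theorem ovation_spec : Claim_equal_ovation := by
  intro s_max num _ _
  unfold Spec_ovation ovation ovation_alt
  rw [show ((0:Int), (0:Int)) = ((0:Int) + 0, (0:Int)) from by norm_num,
      pvA_fold num.toList 0 0 0, pvBuild]
  simp only [List.nil_append, PySem.Str.len_eq, PySem.List.pyRange_one, sub_zero, List.foldl_map]
  rw [pvB_core num.toList 0 0 0]
  apply PySem.List.foldl_congr_mem
  intro acc k hk
  have hk' : k ≤ num.toList.length := le_of_lt (List.mem_range.mp hk)
  have hg : PySem.List.pyGetD ([0] ++ pvSums 0 num.toList) ((0:Int) + (k:Int)) 0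
      = pvPsum (num.toList.take k) := by
    have : (0:Int) + (k:Int) = ((k:Nat):Int) := by ring
    rw [this, List.singleton_append, PySem.List.pyGetD_natCast, List.getD_eq_getElem?_getD,
        pvSums_get _ _ _ hk']
    simp
  rw [hg]
  simp
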